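-- pv_equiv track=rewrite | github.com/jangjichang/JustCode | 20201020/leetcode_14_lognest_common_prefix.py | get_common_prefix
-- ===== SOURCE A (Python) =====
-- from typing import List, Set
--
-- def get_common_prefix(strs: List[str]) -> List[Set]:
--     minimum_str_length = len(strs[0])
--
--     for string in strs:
--         if minimum_str_length > len(string):
--             minimum_str_length = len(string)
--
--     common_prefix = list()
--
--     for string in strs:
--         for index, character in enumerate(string[:minimum_str_length]):
--             try:
--                 common_prefix[index].add(character)
--             except IndexError:
--                 common_prefix.append({character})
--
--     return common_prefix
-- ===== SOURCE B (Python) =====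
-- from typing import List, Set
--
-- def get_common_prefix(strs: List[str]) -> List[Set]:
--     minlen = min(map(len, strs))
--     return [{s[i] for s in strs} for i in range(minlen)]
-- ===== Notes on version B (the rewrite author's own statement) =====
-- stated objective: simpler
-- what changed: B replaces A's row-major traversal that grows the result list via try/except IndexError with a column-major construction: compute minlen once with min(map(len, strs)) and build the set for each column i directly from all strings.
import Mathlib
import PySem

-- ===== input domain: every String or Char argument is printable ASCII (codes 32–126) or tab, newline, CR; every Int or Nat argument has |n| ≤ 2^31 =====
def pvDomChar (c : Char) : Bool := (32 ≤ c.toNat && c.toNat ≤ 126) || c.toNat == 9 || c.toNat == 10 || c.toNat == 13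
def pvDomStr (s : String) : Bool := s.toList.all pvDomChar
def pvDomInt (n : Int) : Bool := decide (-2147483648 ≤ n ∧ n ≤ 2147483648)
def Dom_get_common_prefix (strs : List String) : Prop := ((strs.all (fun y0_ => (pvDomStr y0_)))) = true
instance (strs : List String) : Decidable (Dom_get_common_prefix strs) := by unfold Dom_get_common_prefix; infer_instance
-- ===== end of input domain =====

-- B replaces A's row-major traversal (growing the result via try/except IndexError) by a
-- column-major construction: minlen = min(map(len, strs)) once, then one set per column.
-- Equivalence of the RETURN value on nonempty strs; on [] both raise (A IndexError, B ValueError).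

-- ===== PORT A =====
-- a Python character (1-char string)
def pvCharStr (c : Char) : String := String.ofList [c]

-- body of A's inner loop: try common_prefix[index].add(character) except IndexError: append {character}
def pvStepA (cp : List (List String)) (ic : Int × Char) : List (List String) :=
  match PySem.List.pyGet? cp ic.1 with
  | some st => PySem.List.pySetD cp ic.1 (PySem.Set.add st (pvCharStr ic.2))
  | none => cp ++ [PySem.Set.ofList [pvCharStr ic.2]]

def get_common_prefix (strs : List String) : List (List String) :=
  match strs with
  | [] => []  -- len(strs[0]) raises IndexError: outside Pre_
  | s0 :: _ =>
    let minlen := strs.foldl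
      (fun m s => if m > PySem.Str.len s then PySem.Str.len s else m) (PySem.Str.len s0)
    strs.foldl (fun cp s =>
      (PySem.List.enumerate (PySem.List.slice s.toList none (some minlen))).foldl pvStepA cp) []

-- ===== PORT B =====
def get_common_prefix_alt (strs : List String) : List (List String) :=
  match PySem.List.min? (strs.map PySem.Str.len) (fun x => x) with
  | none => []  -- min() of an empty sequence raises ValueError: outside Pre_
  | some minlen =>
    (PySem.List.pyRange 0 minlen).map (fun i =>
      -- s[i] never raises here (0 ≤ i < minlen ≤ len s), so the total indexing form is exact
      PySem.Set.ofList (strs.map (fun s => pvCharStr (PySem.List.pyGetD s.toList i ' '))))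

-- ===== PRECONDITION & SPEC =====
-- Pre_ excludes only the empty list, on which A raises IndexError at strs[0] (B raises ValueError).
def Pre_get_common_prefix (strs : List String) : Prop := strs ≠ []
instance (strs : List String) : Decidable (Pre_get_common_prefix strs) := by
  unfold Pre_get_common_prefix; infer_instance

def pvWitness_get_common_prefix : List String := ["ab", "ac"]

def Spec_get_common_prefix (strs : List String) (out : List (List String)) : Prop :=
  out = get_common_prefix_alt strs
instance (strs : List String) (out : List (List String)) : Decidable (Spec_get_common_prefix strs out) := by
  unfold Spec_get_common_prefix; infer_instance

-- ===== CLAIM (what is proved, stated in full; the proofs are below) =====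
def Claim_equal_get_common_prefix : Prop :=
  ∀ (strs : List String), Dom_get_common_prefix strs → Pre_get_common_prefix strs →
    Spec_get_common_prefix strs (get_common_prefix strs)

-- ===== LEMMAS AND PROOFS =====

-- the column sets: pvCols ss m = [{s[i] for s in ss} for i in range(m)]
def pvCols (ss : List String) (m : Nat) : List (List String) :=
  (List.range m).map (fun i =>
    PySem.Set.ofList (ss.map (fun s => pvCharStr (s.toList.getD i ' '))))

lemma pvOfListSingle (x : String) : PySem.Set.ofList [x] = [x] := by
  simp [PySem.Set.ofList, PySem.Set.add, PySem.Set.empty, PySem.Set.contains]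

lemma pvOfListSnoc (xs : List String) (x : String) :
    PySem.Set.ofList (xs ++ [x]) = PySem.Set.add (PySem.Set.ofList xs) x := by
  simp [PySem.Set.ofList, List.foldl_append]

-- A's min-length loop, cast down to Nat
lemma pvMinFold (l : List String) (a : Nat) :
    l.foldl (fun mm s => if mm > PySem.Str.len s then PySem.Str.len s else mm) ((a : Nat) : Int)
      = ((l.foldl (fun mm s => min mm s.toList.length) a : Nat) : Int) := by
  induction l generalizing a with
  | nil => rfl
  | cons s t ih =>
    rw [List.foldl_cons,
      show (if ((a : Nat) : Int) > PySem.Str.len s then PySem.Str.len s else ((a : Nat) : Int))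
          = ((min a s.toList.length : Nat) : Int) by
        simp only [PySem.Str.len]; split_ifs with h <;> omega,
      ih]
    rfl

-- B's min(map(len, ·)) fold, cast down to Nat
lemma pvMinFoldB (l : List String) (a : Nat) :
    (l.map PySem.Str.len).foldl min ((a : Nat) : Int)
      = ((l.foldl (fun mm s => min mm s.toList.length) a : Nat) : Int) := by
  induction l generalizing a with
  | nil => rfl
  | cons s t ih =>
    simp only [List.map_cons, List.foldl_cons, PySem.Str.len]
    rw [show min ((a : Nat) : Int) ((s.toList.length : Nat) : Int)
          = ((min a s.toList.length : Nat) : Int) by omega, ih]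

lemma pvFold_le_init (l : List String) (a : Nat) :
    l.foldl (fun mm s => min mm s.toList.length) a ≤ a := by
  induction l generalizing a with
  | nil => exact le_rfl
  | cons s t ih => exact le_trans (ih (min a s.toList.length)) (min_le_left _ _)

lemma pvFold_le_mem (l : List String) (a : Nat) (s : String) (hs : s ∈ l) :
    l.foldl (fun mm s => min mm s.toList.length) a ≤ s.toList.length := by
  induction l generalizing a with
  | nil => cases hs
  | cons x t ih =>
    rcases List.mem_cons.mp hs with h | h
    · subst h
      exact le_trans (pvFold_le_init t _) (min_le_right _ _)
    · exact ih _ h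

-- setting index j of a range-map keeps the range-map shape
lemma pvSetMapRange (m j : Nat) (g : Nat → List String) (v : List String) (hj : j < m) :
    ((List.range m).map g).set j v
      = (List.range m).map (fun i => if i = j then v else g i) := by
  apply List.ext_getElem (by simp)
  intro i h1 h2
  simp only [List.getElem_set, List.getElem_map, List.getElem_range]
  by_cases hij : i = j
  · subst hij; rfl
  · rw [if_neg (fun hh => hij hh.symm), if_neg hij]

-- A's inner loop when every index is in range: pointwise set-add
lemma pvFoldUpd (cs : List Char) (j m : Nat) (g : Nat → List String)
    (h : j + cs.length = m) :
    (PySem.List.enumerate cs ((j : Nat) : Int)).foldl pvStepA ((List.range m).map g)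
      = (List.range m).map (fun i =>
          if j ≤ i then PySem.Set.add (g i) (pvCharStr (cs.getD (i - j) ' ')) else g i) := by
  induction cs generalizing j g with
  | nil =>
    simp only [List.length_nil, Nat.add_zero] at h
    subst h
    simp only [PySem.List.enumerate_nil, List.foldl_nil]
    apply List.map_congr_left
    intro i hi
    rw [if_neg (by simp at hi; omega)]
  | cons c cs' ih =>
    rw [PySem.List.enumerate_cons, List.foldl_cons]
    have hjm : j < m := by simp at h; omega
    have hstep : pvStepA ((List.range m).map g) (((j : Nat) : Int), c)
        = (List.range m).map (fun i => if i = j then PySem.Set.add (g j) (pvCharStr c) else g i) := by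
      simp only [pvStepA, PySem.List.pyGet?_natCast, List.getElem?_map,
        List.getElem?_range, hjm, Option.map_some]
      rw [PySem.List.pySetD_natCast]
      exact pvSetMapRange m j g _ hjm
    rw [hstep, show ((j : Nat) : Int) + 1 = (((j + 1 : Nat)) : Int) by push_cast; ring]
    rw [ih (j + 1) _ (by simp at h ⊢; omega)]
    apply List.map_congr_left
    intro i hi
    simp only [List.mem_range] at hi
    by_cases h1 : j ≤ i
    · rcases Nat.eq_or_lt_of_le h1 with h2 | h2
      · subst h2
        rw [if_neg (by omega), if_pos rfl, if_pos le_rfl]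
        simp
      · rw [if_pos (by omega), if_neg (by omega), if_pos h1,
          show i - j = (i - (j + 1)) + 1 by omega, List.getD_cons_succ]
    · rw [if_neg (by omega), if_neg (by omega), if_neg h1]

-- A's inner loop when every index is past the end: pure append of singletons
lemma pvFoldApp (cs : List Char) (j : Nat) (cp : List (List String)) (h : cp.length = j) :
    (PySem.List.enumerate cs ((j : Nat) : Int)).foldl pvStepA cp
      = cp ++ cs.map (fun c => [pvCharStr c]) := by
  induction cs generalizing j cp with
  | nil => simp [PySem.List.enumerate_nil]
  | cons c cs' ih =>
    rw [PySem.List.enumerate_cons, List.foldl_cons]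
    have hstep : pvStepA cp (((j : Nat) : Int), c) = cp ++ [[pvCharStr c]] := by
      simp only [pvStepA, PySem.List.pyGet?_natCast, List.getElem?_eq_none (le_of_eq h)]
      rw [pvOfListSingle]
    rw [hstep, show ((j : Nat) : Int) + 1 = (((j + 1 : Nat)) : Int) by push_cast; ring]
    rw [ih (j + 1) _ (by simp [h])]
    simp

lemma pvGetDTake (cs : List Char) (m i : Nat) (hm : m ≤ cs.length) (hi : i < m) :
    (cs.take m).getD i ' ' = cs.getD i ' ' := by
  rw [List.getD_eq_getElem _ _ (by simp; omega), List.getD_eq_getElem _ _ (by omega)]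
  simp

-- the first string, processed from the empty list, yields its column singletons
lemma pvBase (s0 : String) (m : Nat) (h : m ≤ s0.toList.length) :
    (PySem.List.enumerate (PySem.List.slice s0.toList none (some ((m : Nat) : Int)))).foldl
        pvStepA []
      = pvCols [s0] m := by
  rw [PySem.List.slice_to_natCast]
  have hfa := pvFoldApp (s0.toList.take m) 0 [] rfl
  rw [Nat.cast_zero] at hfa
  rw [hfa, List.nil_append, pvCols]
  apply List.ext_getElem
  · simp only [List.length_map, List.length_take, List.length_range]; omega
  · intro i h1 h2
    have hi : i < m := by simpa using h2
    simp only [List.getElem_map, List.getElem_take, List.getElem_range, List.map_cons,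
      List.map_nil, pvOfListSingle]
    rw [List.getD_eq_getElem _ _ (by omega)]

-- outer loop invariant: each further string adds its chars to every column set
lemma pvOuter (rest : List String) (done : List String) (m : Nat)
    (hrest : ∀ s ∈ rest, m ≤ s.toList.length) :
    rest.foldl (fun cp s =>
        (PySem.List.enumerate (PySem.List.slice s.toList none (some ((m : Nat) : Int)))).foldl
          pvStepA cp) (pvCols done m)
      = pvCols (done ++ rest) m := by
  induction rest generalizing done with
  | nil => simp
  | cons s rest' ih =>
    have hs : m ≤ s.toList.length := hrest s (List.mem_cons_self)
    rw [List.foldl_cons]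
    have hinner :
        (PySem.List.enumerate (PySem.List.slice s.toList none (some ((m : Nat) : Int)))).foldl
            pvStepA (pvCols done m)
          = pvCols (done ++ [s]) m := by
      rw [PySem.List.slice_to_natCast]
      have hfu := pvFoldUpd (s.toList.take m) 0 m
        (fun i => PySem.Set.ofList (done.map (fun s' => pvCharStr (s'.toList.getD i ' '))))
        (by simp only [List.length_take, Nat.zero_add]; omega)
      rw [Nat.cast_zero] at hfu
      rw [pvCols, hfu, pvCols]
      apply List.map_congr_left
      intro i hi
      simp only [List.mem_range] at hi
      rw [if_pos (Nat.zero_le i), Nat.sub_zero, pvGetDTake s.toList m i hs hi,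
        List.map_append, List.map_cons, List.map_nil, pvOfListSnoc]
    rw [hinner, ih (done ++ [s]) (fun s' h' => hrest s' (List.mem_cons_of_mem _ h'))]
    simp

-- ===== VERDICT (by name: the statement is the Claim_ definition above) =====
theorem get_common_prefix_spec : Claim_equal_get_common_prefix := by
  intro strs _ hpre
  unfold Spec_get_common_prefix
  match strs with
  | [] => exact absurd rfl hpre
  | s0 :: t =>
    set len0 := s0.toList.length with hlen0
    set m := t.foldl (fun mm s => min mm s.toList.length) len0 with hm
    have hA_min : (s0 :: t).foldl
        (fun mm s => if mm > PySem.Str.len s then PySem.Str.len s else mm) (PySem.Str.len s0)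
        = ((m : Nat) : Int) := by
      rw [List.foldl_cons, if_neg (lt_irrefl _),
        show PySem.Str.len s0 = ((len0 : Nat) : Int) from rfl]
      exact pvMinFold t len0
    have hB_min : PySem.List.min? ((s0 :: t).map PySem.Str.len) (fun x => x)
        = some ((m : Nat) : Int) := by
      rw [List.map_cons, PySem.List.min?_id_cons,
        show PySem.Str.len s0 = ((len0 : Nat) : Int) from rfl, pvMinFoldB t len0]
    have hm_le0 : m ≤ len0 := pvFold_le_init t len0
    have hm_le : ∀ s ∈ t, m ≤ s.toList.length := fun s h => pvFold_le_mem t len0 s h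
    calc get_common_prefix (s0 :: t)
        = (s0 :: t).foldl (fun cp s =>
            (PySem.List.enumerate
              (PySem.List.slice s.toList none (some ((m : Nat) : Int)))).foldl pvStepA cp) [] := by
          simp only [get_common_prefix]
          rw [hA_min]
      _ = pvCols (s0 :: t) m := by
          rw [List.foldl_cons, pvBase s0 m hm_le0, pvOuter t [s0] m hm_le]
          rfl
      _ = get_common_prefix_alt (s0 :: t) := by
          simp only [get_common_prefix_alt]
          rw [hB_min]
          simp only [PySem.List.pyRange_zero_natCast, List.map_map, pvCols]
          apply List.map_congr_left
          intro i _
          simp [PySem.List.pyGetD_natCast]
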